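-- pv_equiv track=rewrite | github.com/iesl/box-training-methods | src/box_training_methods/multilabel_classification/dataset.py | prune_labels_for_instance
-- ===== SOURCE A (Python) =====
-- def prune_labels_for_instance(ls):
--     """only retains most granular labels"""
--     pruned_ls = []
--     for i in range(len(ls)):
--         label_i_is_nobodys_parent = True
--         if i < len(ls) - 1:
--             for j in range(i+1, len(ls)):
--                 if f".{ls[j]}.".startswith(f".{ls[i]}."):
--                     label_i_is_nobodys_parent = False
--                     break
--         if label_i_is_nobodys_parent:
--             pruned_ls.append(ls[i])
--     return pruned_ls
-- ===== SOURCE B (Python) =====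
-- def prune_labels_for_instance(ls):
--     """only retains most granular labels"""
--     seen = set()  # all dotted prefixes of labels already scanned (the later labels)
--     out = []
--     for s in reversed(ls):
--         if s not in seen:
--             out.append(s)
--         for i in range(len(s)):
--             if s[i] == '.':
--                 seen.add(s[:i])
--         seen.add(s)
--     out.reverse()
--     return out
-- ===== Notes on version B (the rewrite author's own statement) =====
-- stated objective: faster
-- what changed: Replaces A's quadratic pairwise startswith scan (for each label, scan all later labels) by a single reverse pass that maintains a set of all dot-boundary prefixes of the labels already seen, so each label is checked by one set-membership test.
import Mathlib
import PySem

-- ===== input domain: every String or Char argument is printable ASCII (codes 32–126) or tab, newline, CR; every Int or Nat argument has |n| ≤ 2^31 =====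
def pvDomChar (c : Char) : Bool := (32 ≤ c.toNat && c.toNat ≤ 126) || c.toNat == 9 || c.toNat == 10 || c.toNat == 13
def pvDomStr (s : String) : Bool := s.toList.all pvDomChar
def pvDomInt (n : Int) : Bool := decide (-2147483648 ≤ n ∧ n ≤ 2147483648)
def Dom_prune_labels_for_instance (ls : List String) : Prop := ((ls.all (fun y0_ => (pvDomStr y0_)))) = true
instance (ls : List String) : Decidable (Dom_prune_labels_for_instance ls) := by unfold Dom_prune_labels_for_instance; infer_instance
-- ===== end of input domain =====

-- B replaces A's pairwise startswith scan by one reverse pass over a set of dot-boundary prefixes (faster).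
-- ===== PORT A =====
-- inner 'for j in range(i+1, len(ls))' loop with its break
def pruneInnerA (ls : List String) (si : String) : List Int -> Bool
  | [] => true
  | j :: rest =>
      if PySem.Str.startswith ("." ++ (PySem.List.pyGet? ls j).getD "" ++ ".") ("." ++ si ++ ".") then
        false
      else pruneInnerA ls si rest

-- body of the outer 'for i in range(len(ls))' loop
def outerBodyA (ls : List String) (pruned : List String) (i : Int) : List String :=
  let flag : Bool :=
    if i < (ls.length : Int) - 1 then
      pruneInnerA ls ((PySem.List.pyGet? ls i).getD "") (PySem.List.pyRange (i + 1) (ls.length : Int) 1)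
    else true
  if flag then pruned ++ [(PySem.List.pyGet? ls i).getD ""] else pruned

def prune_labels_for_instance (ls : List String) : List String :=
  (PySem.List.pyRange 0 (ls.length : Int) 1).foldl (outerBodyA ls) []

-- ===== PORT B =====
-- "for i in range(len(s)): if s[i] == '.': seen.add(s[:i])" followed by "seen.add(s)"
def addDotPrefixes (seen : PySem.Set String) (s : String) : PySem.Set String :=
  PySem.Set.add
    ((PySem.List.pyRange 0 (PySem.Str.len s) 1).foldl
      (fun st i =>
        if (PySem.Str.pyGet? s i).getD ' ' = '.' then
          PySem.Set.add st (PySem.Str.slice s none (some i))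
        else st)
      seen)
    s

def prune_labels_for_instance_alt (ls : List String) : List String :=
  let res := ls.reverse.foldl
    (fun (acc : List String × PySem.Set String) s =>
      (if PySem.Set.contains acc.2 s then acc.1 else acc.1 ++ [s], addDotPrefixes acc.2 s))
    ([], PySem.Set.empty)
  res.1.reverse

-- ===== PRECONDITION & SPEC =====
def Spec_prune_labels_for_instance (ls : List String) (out : List String) : Prop := out = prune_labels_for_instance_alt ls
instance (ls : List String) (out : List String) : Decidable (Spec_prune_labels_for_instance ls out) := by unfold Spec_prune_labels_for_instance; infer_instance

-- ===== CLAIM (what is proved, stated in full; the proofs are below) =====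
def Claim_equal_prune_labels_for_instance : Prop := ∀ (ls : List String), Dom_prune_labels_for_instance ls → Spec_prune_labels_for_instance ls (prune_labels_for_instance ls)

-- ===== LEMMAS AND PROOFS =====

-- t is a dot-boundary prefix of s, i.e. "." ++ t ++ "." is a prefix of "." ++ s ++ "."
def dotpref (t s : List Char) : Bool := decide ((t ++ ['.']) <+: (s ++ ['.']))

-- reference function both ports are reduced to: keep s iff no later label has s as a dot-boundary prefix
def pruneSpec : List String -> List String
  | [] => []
  | s :: rest =>
      if rest.all (fun s' => !dotpref s.toList s'.toList) then s :: pruneSpec rest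
      else pruneSpec rest

lemma startswith_eq_dotpref (t s : String) :
    PySem.Str.startswith ("." ++ s ++ ".") ("." ++ t ++ ".") = dotpref t.toList s.toList := by
  have h : PySem.Str.startswith ("." ++ s ++ ".") ("." ++ t ++ ".") = true ↔ dotpref t.toList s.toList = true := by
    simp [PySem.Str.startswith_eq, PySem.Chars.startswith_iff, dotpref, List.cons_prefix_cons]
  exact Bool.eq_iff_iff.mpr h

lemma dotpref_iff (t s : List Char) :
    dotpref t s = true ↔ t = s ∨ ∃ i, i < s.length ∧ s[i]? = some '.' ∧ t = s.take i := by
  simp only [dotpref, decide_eq_true_eq]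
  constructor
  · intro h
    have hl : t.length + 1 ≤ s.length + 1 := by simpa using h.length_le
    rcases Nat.lt_or_ge t.length s.length with hlt | hge
    · right
      refine ⟨t.length, hlt, ?_, ?_⟩
      · have := List.prefix_iff_eq_take.mp h
        have h2 : (s ++ ['.']).take (t.length + 1) = s.take (t.length + 1) := by
          rw [List.take_append_of_le_length (by omega)]
        rw [show (t ++ ['.']).length = t.length + 1 by simp] at this
        rw [h2] at this
        have := congrArg (fun l => l[t.length]?) this
        simpa [List.getElem?_take, hlt] using this.symm
      · have := List.prefix_iff_eq_take.mp h
        have h2 : (s ++ ['.']).take (t.length + 1) = s.take (t.length + 1) := by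
          rw [List.take_append_of_le_length (by omega)]
        rw [show (t ++ ['.']).length = t.length + 1 by simp] at this
        rw [h2] at this
        have := congrArg (fun l => l.take t.length) this
        simpa [List.take_take] using this
    · left
      have heq : t.length = s.length := by omega
      have := h.eq_of_length (by simp [heq])
      exact (List.append_left_inj _).mp this
  · rintro (rfl | ⟨i, hi, hdot, rfl⟩)
    · exact List.prefix_refl _
    · have : s.take i ++ ['.'] = s.take (i + 1) := by
        rw [List.take_add_one, hdot]; rfl
      rw [this]
      exact (List.take_prefix _ _).trans (List.prefix_append _ _)

lemma inner_eq (ls : List String) (t : String) : ∀ (k : Nat),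
    pruneInnerA ls t (PySem.List.pyRange (k : Int) (ls.length : Int) 1)
      = (ls.drop k).all (fun s' => !dotpref t.toList s'.toList) := by
  intro k
  by_cases hk : k < ls.length
  · rw [PySem.List.pyRange_one_cons (by exact_mod_cast hk)]
    rw [List.drop_eq_getElem_cons hk]
    simp only [pruneInnerA, PySem.List.pyGet?_natCast, List.getElem?_eq_getElem hk, Option.getD_some,
      startswith_eq_dotpref, List.all_cons]
    rw [show ((k : Int) + 1) = ((k+1 : Nat) : Int) by push_cast; ring, inner_eq ls t (k+1)]
    cases h : dotpref t.toList ls[k].toList <;> simp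
  · have h1 : PySem.List.pyRange (k : Int) (ls.length : Int) 1 = [] := by
      simp [List.eq_nil_iff_forall_not_mem, PySem.List.mem_pyRange_one]
      intro x hx; omega
    rw [h1, List.drop_eq_nil_of_le (by omega)]
    rfl
termination_by k => ls.length - k

lemma outer_eq (ls : List String) : ∀ (k : Nat) (acc : List String),
    (PySem.List.pyRange (k : Int) (ls.length : Int) 1).foldl (outerBodyA ls) acc
    = acc ++ pruneSpec (ls.drop k) := by
  intro k acc
  by_cases hk : k < ls.length
  · rw [PySem.List.pyRange_one_cons (by exact_mod_cast hk), List.foldl_cons,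
      show ((k : Int) + 1) = ((k+1 : Nat) : Int) by push_cast; ring,
      outer_eq ls (k+1)]
    have hbody : outerBodyA ls acc (k : Int)
        = if (ls.drop (k+1)).all (fun s' => !dotpref ls[k].toList s'.toList) then acc ++ [ls[k]] else acc := by
      unfold outerBodyA
      by_cases h2 : (k : Int) < (ls.length : Int) - 1
      · rw [if_pos h2, show ((k : Int) + 1) = ((k+1 : Nat) : Int) by push_cast; ring, inner_eq]
        simp [PySem.List.pyGet?_natCast, List.getElem?_eq_getElem hk]
      · rw [if_neg h2, List.drop_eq_nil_of_le (by omega)]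
        simp [PySem.List.pyGet?_natCast, List.getElem?_eq_getElem hk]
    rw [hbody, List.drop_eq_getElem_cons hk]
    simp only [pruneSpec]
    cases h : (ls.drop (k+1)).all (fun s' => !dotpref ls[k].toList s'.toList) <;> simp
  · have h1 : PySem.List.pyRange (k : Int) (ls.length : Int) 1 = [] := by
      simp [List.eq_nil_iff_forall_not_mem, PySem.List.mem_pyRange_one]
      intro x hx; omega
    rw [h1, List.drop_eq_nil_of_le (by omega)]
    simp [pruneSpec]
termination_by k => ls.length - k

lemma A_eq_spec (ls : List String) : prune_labels_for_instance ls = pruneSpec ls := by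
  unfold prune_labels_for_instance
  have := outer_eq ls 0 []
  simpa using this

lemma mem_foldl_ite_add (P : Int → Prop) [DecidablePred P] (g : Int → String) (t : String) :
    ∀ (js : List Int) (st : PySem.Set String),
    (t ∈ js.foldl (fun st i => if P i then PySem.Set.add st (g i) else st) st)
      ↔ t ∈ st ∨ ∃ i ∈ js, P i ∧ t = g i := by
  intro js
  induction js with
  | nil => simp
  | cons j rest ih =>
    intro st
    simp only [List.foldl_cons, ih, List.mem_cons]
    by_cases h : P j
    · rw [if_pos h, PySem.Set.mem_add]
      constructor
      · rintro (⟨hs | rfl⟩ | ⟨i, hi, hp, rfl⟩)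
        · exact Or.inl hs
        · exact Or.inr ⟨j, Or.inl rfl, h, rfl⟩
        · exact Or.inr ⟨i, Or.inr hi, hp, rfl⟩
      · rintro (hs | ⟨i, rfl | hi, hp, rfl⟩)
        · exact Or.inl (Or.inl hs)
        · exact Or.inl (Or.inr rfl)
        · exact Or.inr ⟨i, hi, hp, rfl⟩
    · rw [if_neg h]
      constructor
      · rintro (hs | ⟨i, hi, hp, rfl⟩)
        · exact Or.inl hs
        · exact Or.inr ⟨i, Or.inr hi, hp, rfl⟩
      · rintro (hs | ⟨i, rfl | hi, hp, rfl⟩)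
        · exact Or.inl hs
        · exact absurd hp h
        · exact Or.inr ⟨i, hi, hp, rfl⟩

lemma mem_addDotPrefixes (seen : PySem.Set String) (s t : String) :
    t ∈ addDotPrefixes seen s ↔ t ∈ seen ∨ dotpref t.toList s.toList = true := by
  unfold addDotPrefixes
  rw [PySem.Set.mem_add, mem_foldl_ite_add, dotpref_iff]
  have hlen : PySem.Str.len s = (s.toList.length : Int) := by simp [PySem.Str.len_eq]
  constructor
  · rintro (⟨hs | ⟨i, hi, hp, rfl⟩⟩ | rfl)
    · exact Or.inl hs
    · rw [PySem.List.mem_pyRange_one] at hi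
      refine Or.inr (Or.inr ⟨i.toNat, by omega, ?_, ?_⟩)
      · rw [show i = ((i.toNat : Nat) : Int) by omega, PySem.Str.pyGet?_natCast] at hp
        cases hx : s.toList[i.toNat]? with
        | none => rw [hx] at hp; simp at hp
        | some c => rw [hx] at hp; simp at hp; subst hp; rfl
      · rw [PySem.Str.toList_slice]
        simp only [PySem.Chars.slice_eq_listSlice]
        have h0 : (0:ℤ) ≤ i := by omega
        exact PySem.List.slice_to s.toList h0
    · exact Or.inr (Or.inl rfl)
  · rintro (hs | heq | ⟨i, hi, hp, hteq⟩)
    · exact Or.inl (Or.inl hs)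
    · exact Or.inr (String.toList_inj.mp heq)
    · refine Or.inl (Or.inr ⟨(i : Int), ?_, ?_, ?_⟩)
      · rw [PySem.List.mem_pyRange_one]; omega
      · rw [PySem.Str.pyGet?_natCast, hp]; rfl
      · apply String.toList_inj.mp
        rw [PySem.Str.toList_slice]
        simp only [PySem.Chars.slice_eq_listSlice]
        have h0 : (0:ℤ) ≤ ((i:ℕ):ℤ) := by omega
        rw [PySem.List.slice_to s.toList h0]
        simpa using hteq

lemma B_fold (ls : List String) :
    (ls.foldr
      (fun s (acc : List String × PySem.Set String) =>
        (if PySem.Set.contains acc.2 s then acc.1 else acc.1 ++ [s], addDotPrefixes acc.2 s))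
      ([], PySem.Set.empty)).1 = (pruneSpec ls).reverse
    ∧ ∀ t, (t ∈ (ls.foldr
      (fun s (acc : List String × PySem.Set String) =>
        (if PySem.Set.contains acc.2 s then acc.1 else acc.1 ++ [s], addDotPrefixes acc.2 s))
      ([], PySem.Set.empty)).2 ↔ ∃ s' ∈ ls, dotpref t.toList s'.toList = true) := by
  induction ls with
  | nil => simp [pruneSpec, PySem.Set.empty]
  | cons s rest ih =>
    obtain ⟨ih1, ih2⟩ := ih
    rw [List.foldr_cons]
    constructor
    · simp only [ih1]
      have hc : (PySem.Set.contains (rest.foldr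
          (fun s (acc : List String × PySem.Set String) =>
            (if PySem.Set.contains acc.2 s then acc.1 else acc.1 ++ [s], addDotPrefixes acc.2 s))
          ([], PySem.Set.empty)).2 s)
          = !(rest.all (fun s' => !dotpref s.toList s'.toList)) := by
        rw [Bool.eq_iff_iff, PySem.Set.contains_iff, ih2 s]
        simp
      simp only [hc, pruneSpec]
      rcases Bool.dichotomy (rest.all (fun s' => !dotpref s.toList s'.toList)) with h | h <;> simp [h]
    · intro t
      simp only [mem_addDotPrefixes, ih2 t, List.mem_cons]
      constructor
      · rintro (⟨s', hs', h⟩ | h)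
        · exact ⟨s', Or.inr hs', h⟩
        · exact ⟨s, Or.inl rfl, h⟩
      · rintro ⟨s', rfl | hs', h⟩
        · exact Or.inr h
        · exact Or.inl ⟨s', hs', h⟩

lemma B_eq_spec (ls : List String) : prune_labels_for_instance_alt ls = pruneSpec ls := by
  unfold prune_labels_for_instance_alt
  rw [List.foldl_reverse]
  have := (B_fold ls).1
  simp only [this]
  simp

-- ===== VERDICT (by name: the statement is the Claim_ definition above) =====
theorem prune_labels_for_instance_spec : Claim_equal_prune_labels_for_instance := by
  intro ls _
  unfold Spec_prune_labels_for_instance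
  rw [A_eq_spec, B_eq_spec]
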